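-- pv_equiv track=rewrite | github.com/MostafaJammoul/EECE655-PassiveFingerprinting-TopologyMapping | preprocess_scripts/cesnet_preprocess.py | extract_os_family
-- ===== SOURCE A (Python) =====
-- def extract_os_family(os_label):
--     """
--     Extract OS family from detailed OS label
--
--     NOTE: This function is NOT used during preprocessing to avoid data leakage.
--     OS family is derived from the target (os_label), which would allow the model
--     to trivially predict the OS without learning real fingerprinting patterns.
--
--     This function is kept for optional post-hoc analysis only.
--
--     Examples:
--     - "Windows 11" → "Windows"
--     - "Ubuntu 22.04" → "Linux"
--     - "macOS 14" → "macOS"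
--     """
--     os_lower = str(os_label).lower()
--
--     if any(w in os_lower for w in ['windows', 'win10', 'win11', 'win7', 'win8']):
--         return 'Windows'
--     elif any(w in os_lower for w in ['ubuntu', 'debian', 'fedora', 'centos', 'linux', 'kali', 'mint', 'arch']):
--         return 'Linux'
--     elif any(w in os_lower for w in ['macos', 'darwin', 'osx', 'mac']):
--         return 'macOS'
--     elif 'android' in os_lower:
--         return 'Android'
--     elif any(w in os_lower for w in ['ios', 'iphone', 'ipad']):
--         return 'iOS'
--     elif 'bsd' in os_lower:
--         return 'BSD'
--     else:
--         return 'Other'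
-- ===== SOURCE B (Python) =====
-- FAMILY_BY_PRIORITY = {0: 'Windows', 1: 'Linux', 2: 'macOS', 3: 'Android', 4: 'iOS', 5: 'BSD'}
--
-- KEYWORD_PRIORITY = [
--     ('windows', 0), ('win10', 0), ('win11', 0), ('win7', 0), ('win8', 0),
--     ('ubuntu', 1), ('debian', 1), ('fedora', 1), ('centos', 1),
--     ('linux', 1), ('kali', 1), ('mint', 1), ('arch', 1),
--     ('macos', 2), ('darwin', 2), ('osx', 2), ('mac', 2),
--     ('android', 3),
--     ('ios', 4), ('iphone', 4), ('ipad', 4),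
--     ('bsd', 5),
-- ]
--
--
-- def extract_os_family(os_label):
--     os_lower = str(os_label).lower()
--     hits = [p for kw, p in KEYWORD_PRIORITY if kw in os_lower]
--     if not hits:
--         return 'Other'
--     return FAMILY_BY_PRIORITY.get(min(hits), 'Other')
-- ===== Notes on version B (the rewrite author's own statement) =====
-- stated objective: alternative
-- what changed: Replaces the six-branch if/elif cascade by a flat keyword->priority table: B collects the priorities of all matching keywords in one comprehension and returns the family of the minimum priority (cascade of early returns vs. min over a scored match set).
import Mathlib
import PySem

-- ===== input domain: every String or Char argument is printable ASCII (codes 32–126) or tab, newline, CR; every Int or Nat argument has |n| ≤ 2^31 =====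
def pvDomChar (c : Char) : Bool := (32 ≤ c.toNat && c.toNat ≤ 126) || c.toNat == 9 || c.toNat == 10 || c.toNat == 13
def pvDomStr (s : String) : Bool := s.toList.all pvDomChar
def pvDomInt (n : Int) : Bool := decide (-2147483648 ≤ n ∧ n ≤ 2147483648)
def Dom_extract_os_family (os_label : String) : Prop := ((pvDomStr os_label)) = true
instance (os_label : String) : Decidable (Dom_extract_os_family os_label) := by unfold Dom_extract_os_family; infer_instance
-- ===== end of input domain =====

-- B replaces A's if/elif cascade by a flat keyword->priority table: it collects the
-- priorities of all matching keywords and returns the family of the minimum priority.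

-- ===== PORT A =====
def extract_os_family (os_label : String) : String :=
  let os_lower := PySem.Str.lower os_label
  if ["windows", "win10", "win11", "win7", "win8"].any (fun w => PySem.Str.isIn w os_lower) then
    "Windows"
  else if ["ubuntu", "debian", "fedora", "centos", "linux", "kali", "mint", "arch"].any (fun w => PySem.Str.isIn w os_lower) then
    "Linux"
  else if ["macos", "darwin", "osx", "mac"].any (fun w => PySem.Str.isIn w os_lower) then
    "macOS"
  else if PySem.Str.isIn "android" os_lower then
    "Android"
  else if ["ios", "iphone", "ipad"].any (fun w => PySem.Str.isIn w os_lower) then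
    "iOS"
  else if PySem.Str.isIn "bsd" os_lower then
    "BSD"
  else
    "Other"

-- ===== PORT B =====
def pvFamilyByPriority : PySem.Dict Int String :=
  PySem.Dict.ofList [(0, "Windows"), (1, "Linux"), (2, "macOS"), (3, "Android"), (4, "iOS"), (5, "BSD")]

def pvKeywordPriority : List (String × Int) :=
  [("windows", 0), ("win10", 0), ("win11", 0), ("win7", 0), ("win8", 0),
   ("ubuntu", 1), ("debian", 1), ("fedora", 1), ("centos", 1),
   ("linux", 1), ("kali", 1), ("mint", 1), ("arch", 1),
   ("macos", 2), ("darwin", 2), ("osx", 2), ("mac", 2),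
   ("android", 3),
   ("ios", 4), ("iphone", 4), ("ipad", 4),
   ("bsd", 5)]

def extract_os_family_alt (os_label : String) : String :=
  let os_lower := PySem.Str.lower os_label
  let hits := (pvKeywordPriority.filter (fun kp => PySem.Str.isIn kp.1 os_lower)).map (fun kp => kp.2)
  match PySem.List.min? hits (fun x => x) with
  | none => "Other"
  | some m => PySem.Dict.getD pvFamilyByPriority m "Other"

-- ===== PRECONDITION & SPEC =====
def Spec_extract_os_family (os_label : String) (out : String) : Prop := out = extract_os_family_alt os_label
instance (os_label : String) (out : String) : Decidable (Spec_extract_os_family os_label out) := by unfold Spec_extract_os_family; infer_instance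

-- ===== CLAIM (what is proved, stated in full; the proofs are below) =====
def Claim_equal_extract_os_family : Prop := ∀ (os_label : String), Dom_extract_os_family os_label → Spec_extract_os_family os_label (extract_os_family os_label)

-- ===== LEMMAS AND PROOFS =====

-- the priorities of the keywords that match, as B computes them
def pvHits (low : String) : List Int :=
  (pvKeywordPriority.filter (fun kp => PySem.Str.isIn kp.1 low)).map (fun kp => kp.2)

-- min over the identity key of a list that contains k and is bounded below by k is k
lemma pv_min?_eq (l : List Int) (k : Int) (hk : k ∈ l) (hle : ∀ x ∈ l, k ≤ x) :
    PySem.List.min? l (fun x => x) = some k := by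
  cases hm : PySem.List.min? l (fun x => x) with
  | none =>
      rw [PySem.List.min?_eq_none_iff] at hm
      subst hm; cases hk
  | some m =>
      have h1 : m ∈ l := PySem.List.min?_mem hm
      have h2 : ∀ y ∈ l, m ≤ y := PySem.List.min?_isMin hm
      have hmk : m ≤ k := h2 k hk
      have hkm : k ≤ m := hle m h1
      rw [le_antisymm hmk hkm]

lemma pv_mem_hits (low : String) (kw : String) (k : Int)
    (ht : (kw, k) ∈ pvKeywordPriority) (hin : PySem.Str.isIn kw low = true) :
    k ∈ pvHits low := by
  exact List.mem_map.mpr ⟨(kw, k), List.mem_filter.mpr ⟨ht, hin⟩, rfl⟩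

lemma pv_hits_bound (low : String) (k : Int)
    (hb : ∀ kp ∈ pvKeywordPriority, PySem.Str.isIn kp.1 low = true → k ≤ kp.2) :
    ∀ x ∈ pvHits low, k ≤ x := by
  intro x hx
  obtain ⟨kp, hkp, rfl⟩ := List.mem_map.mp hx
  have := List.mem_filter.mp hkp
  exact hb kp this.1 this.2

-- ===== VERDICT (by name: the statement is the Claim_ definition above) =====
theorem extract_os_family_spec : Claim_equal_extract_os_family := by
  intro os_label _
  unfold Spec_extract_os_family extract_os_family extract_os_family_alt
  simp only [List.any_cons, List.any_nil, Bool.or_false, Bool.or_eq_true]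
  set low := PySem.Str.lower os_label with hlow
  show _ = (match PySem.List.min? (pvHits low) (fun x => x) with
            | none => "Other"
            | some m => PySem.Dict.getD pvFamilyByPriority m "Other")
  split_ifs with h0 h1 h2 h3 h4 h5
  · have hmem : (0 : Int) ∈ pvHits low := by
      rcases h0 with h | h | h | h | h <;>
        exact pv_mem_hits low _ _ (by decide) h
    rw [pv_min?_eq _ _ hmem (pv_hits_bound low 0 (by intro kp hkp _; fin_cases hkp <;> decide))]
    rfl
  · simp only [not_or, Bool.not_eq_true] at h0
    have hmem : (1 : Int) ∈ pvHits low := by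
      rcases h1 with h | h | h | h | h | h | h | h <;>
        exact pv_mem_hits low _ _ (by decide) h
    rw [pv_min?_eq _ _ hmem (pv_hits_bound low 1 (by
      intro kp hkp hin; fin_cases hkp <;> simp_all))]
    rfl
  · simp only [not_or, Bool.not_eq_true] at h0 h1
    have hmem : (2 : Int) ∈ pvHits low := by
      rcases h2 with h | h | h | h <;>
        exact pv_mem_hits low _ _ (by decide) h
    rw [pv_min?_eq _ _ hmem (pv_hits_bound low 2 (by
      intro kp hkp hin; fin_cases hkp <;> simp_all))]
    rfl
  · simp only [not_or, Bool.not_eq_true] at h0 h1 h2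
    have hmem : (3 : Int) ∈ pvHits low := pv_mem_hits low "android" 3 (by decide) h3
    rw [pv_min?_eq _ _ hmem (pv_hits_bound low 3 (by
      intro kp hkp hin; fin_cases hkp <;> simp_all))]
    rfl
  · simp only [not_or, Bool.not_eq_true] at h0 h1 h2 h3
    have hmem : (4 : Int) ∈ pvHits low := by
      rcases h4 with h | h | h <;>
        exact pv_mem_hits low _ _ (by decide) h
    rw [pv_min?_eq _ _ hmem (pv_hits_bound low 4 (by
      intro kp hkp hin; fin_cases hkp <;> simp_all))]
    rfl
  · simp only [not_or, Bool.not_eq_true] at h0 h1 h2 h3 h4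
    have hmem : (5 : Int) ∈ pvHits low := pv_mem_hits low "bsd" 5 (by decide) h5
    rw [pv_min?_eq _ _ hmem (pv_hits_bound low 5 (by
      intro kp hkp hin; fin_cases hkp <;> simp_all))]
    rfl
  · simp only [not_or, Bool.not_eq_true] at h0 h1 h2 h3 h4 h5
    have hnil : pvHits low = [] := by
      unfold pvHits
      rw [List.filter_eq_nil_iff.mpr (by
        intro kp hkp; fin_cases hkp <;> simp_all)]
      rfl
    rw [hnil]
    rfl
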